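-- pv_equiv track=rewrite | github.com/welshDog/hypercode | hypercode-core/hypercode/backends/crispr_engine.py | scan_genome_for_off_targets
-- ===== SOURCE A (Python) =====
-- from typing import List, Tuple, Dict, Any
--
-- def calculate_mismatch_score(guide_seq: str, target_seq: str) -> int:
--     """
--     Calculates the number of mismatches between two sequences of equal length.
--     """
--     if len(guide_seq) != len(target_seq):
--         return 999 # Invalid comparison
--
--     mismatches = 0
--     for i in range(len(guide_seq)):
--         if guide_seq[i] != target_seq[i]:
--             mismatches += 1
--     return mismatches
--
-- def scan_genome_for_off_targets(guide_seq: str, genome_seq: str, max_mismatches: int = 4) -> List[Tuple[int, int, str]]: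
--     """
--     Scans a genome sequence for potential off-target binding sites.
--     Returns a list of (index, mismatches, sequence_found).
--
--     Note: This is a simplified O(N*M) scanner for the MVP.
--     Real-world tools use efficient indexing (e.g., Bowtie, BWA).
--     """
--     guide_len = len(guide_seq)
--     genome_len = len(genome_seq)
--     off_targets = []
--
--     # Brute force scan (okay for small viral genomes/plasmids in MVP)
--     # Step by 1bp
--     for i in range(genome_len - guide_len + 1):
--         subseq = genome_seq[i : i + guide_len]
--         mismatches = calculate_mismatch_score(guide_seq, subseq)
--
--         if mismatches <= max_mismatches and mismatches > 0:
--              off_targets.append((i, mismatches, subseq))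
--
--     return off_targets
-- ===== SOURCE B (Python) =====
-- def scan_genome_for_off_targets(guide_seq, genome_seq, max_mismatches=4):
--     """Column-sweep scanner: instead of scoring each window separately, sweep the
--     guide once and update the mismatch tallies of ALL windows per guide position."""
--     m = len(guide_seq)
--     n = len(genome_seq)
--     w = n - m + 1
--     if m == 0 or w <= 0:
--         return []
--     mis = [0] * w
--     for p, gch in enumerate(guide_seq):
--         mis = [d + (genome_seq[off + p] != gch) for off, d in enumerate(mis)]
--     return [(i, d, genome_seq[i:i + m]) for i, d in enumerate(mis) if 0 < d <= max_mismatches]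
-- ===== Notes on version B (the rewrite author's own statement) =====
-- stated objective: alternative
-- what changed: B transposes the scan: a single sweep per guide position updates the mismatch tallies of ALL windows simultaneously (column-major accumulation over an array of window scores, comprehension output), instead of A's per-window slicing and a helper that rescans each window.
import Mathlib
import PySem

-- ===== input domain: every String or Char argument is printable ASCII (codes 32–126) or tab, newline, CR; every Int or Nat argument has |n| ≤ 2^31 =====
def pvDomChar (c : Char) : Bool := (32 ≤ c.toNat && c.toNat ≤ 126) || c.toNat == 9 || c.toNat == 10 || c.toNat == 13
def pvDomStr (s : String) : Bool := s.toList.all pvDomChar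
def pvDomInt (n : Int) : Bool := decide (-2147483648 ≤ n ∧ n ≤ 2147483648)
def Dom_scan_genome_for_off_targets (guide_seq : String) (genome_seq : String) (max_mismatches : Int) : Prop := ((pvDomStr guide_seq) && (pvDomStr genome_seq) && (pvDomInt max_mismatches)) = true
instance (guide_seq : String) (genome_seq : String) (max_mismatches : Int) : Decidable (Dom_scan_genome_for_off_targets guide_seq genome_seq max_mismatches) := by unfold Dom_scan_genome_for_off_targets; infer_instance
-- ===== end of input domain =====

-- B replaces A's per-window rescan (slice + helper per window) by a transposed
-- column sweep updating the tallies of all windows at once (alternative decomposition, same cost).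


-- ===== PORT A =====
-- literal port of calculate_mismatch_score; both indexings are always in range
-- when A calls it, so pyGetD with a dummy default is exact
def calculate_mismatch_score (guide_seq : String) (target_seq : String) : Int :=
  if PySem.Str.len guide_seq ≠ PySem.Str.len target_seq then 999
  else
    (PySem.List.pyRange 0 (PySem.Str.len guide_seq) 1).foldl
      (fun mismatches i =>
        if PySem.List.pyGetD guide_seq.toList i ' ' ≠ PySem.List.pyGetD target_seq.toList i ' '
        then mismatches + 1 else mismatches) 0

def scan_genome_for_off_targets (guide_seq : String) (genome_seq : String) (max_mismatches : Int) : List (Int × Int × String) :=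
  let guide_len : Int := PySem.Str.len guide_seq
  let genome_len : Int := PySem.Str.len genome_seq
  (PySem.List.pyRange 0 (genome_len - guide_len + 1) 1).foldl
    (fun off_targets i =>
      let subseq := String.ofList (PySem.List.slice genome_seq.toList (some i) (some (i + guide_len)))
      let mismatches := calculate_mismatch_score guide_seq subseq
      if mismatches ≤ max_mismatches ∧ mismatches > 0 then off_targets ++ [(i, mismatches, subseq)]
      else off_targets) []

-- ===== PORT B =====
def scan_genome_for_off_targets_alt (guide_seq : String) (genome_seq : String) (max_mismatches : Int) : List (Int × Int × String) :=
  let g := guide_seq.toList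
  let s := genome_seq.toList
  let m := g.length
  let n := s.length
  if m = 0 ∨ n < m then []
  else
    let w := n - m + 1
    let mis :=
      (PySem.List.enumerate g 0).foldl
        (fun mis pc =>
          (PySem.List.enumerate mis 0).map
            (fun od => od.2 + if PySem.List.pyGetD s (od.1 + pc.1) ' ' ≠ pc.2 then 1 else 0))
        (List.replicate w (0 : Int))
    (PySem.List.enumerate mis 0).filterMap
      (fun idd =>
        if 0 < idd.2 ∧ idd.2 ≤ max_mismatches then
          some (idd.1, idd.2, String.ofList (PySem.List.slice s (some idd.1) (some (idd.1 + (m : Int)))))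
        else none)

-- ===== PRECONDITION & SPEC =====
def Spec_scan_genome_for_off_targets (guide_seq : String) (genome_seq : String) (max_mismatches : Int) (out : List (Int × Int × String)) : Prop := out = scan_genome_for_off_targets_alt guide_seq genome_seq max_mismatches
instance (guide_seq : String) (genome_seq : String) (max_mismatches : Int) (out : List (Int × Int × String)) : Decidable (Spec_scan_genome_for_off_targets guide_seq genome_seq max_mismatches out) := by unfold Spec_scan_genome_for_off_targets; infer_instance

-- ===== CLAIM (what is proved, stated in full; the proofs are below) =====
def Claim_equal_scan_genome_for_off_targets : Prop := ∀ (guide_seq : String) (genome_seq : String) (max_mismatches : Int), Dom_scan_genome_for_off_targets guide_seq genome_seq max_mismatches → Spec_scan_genome_for_off_targets guide_seq genome_seq max_mismatches (scan_genome_for_off_targets guide_seq genome_seq max_mismatches)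

-- ===== LEMMAS AND PROOFS =====

-- mismatch count of the length-m window of the genome starting at offset i
def dcount (g s : List Char) (i : Nat) : Int :=
  ((List.range g.length).countP (fun p => decide (g.getD p ' ' ≠ s.getD (i + p) ' ')) : Int)

-- the window returned with each hit
def windowStr (g s : List Char) (i : Nat) : String :=
  String.ofList ((s.drop i).take g.length)

theorem filtermap_of_filter {α β : Type} (p : α → Bool) (F : α → β) (l : List α) :
    (l.filter p).map F = l.filterMap (fun k => if p k then some (F k) else none) := by
  induction l with
  | nil => rfl
  | cons a t ih => simp only [List.filter_cons, List.filterMap_cons]; split <;> simp_all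

theorem mismatch_window (guide : String) (s : List Char) (i : Nat)
    (h : i + guide.toList.length ≤ s.length) :
    calculate_mismatch_score guide (String.ofList ((s.drop i).take guide.toList.length))
      = dcount guide.toList s i := by
  have hw : ((s.drop i).take guide.toList.length).length = guide.toList.length := by
    simp only [List.length_take, List.length_drop]; omega
  unfold calculate_mismatch_score dcount
  rw [if_neg (by simp only [PySem.Str.len_eq, String.toList_ofList, hw]; simp)]
  rw [PySem.Str.len_eq,
      PySem.List.foldl_ite_add_one
        (fun j => PySem.List.pyGetD guide.toList j ' ' ≠
                  PySem.List.pyGetD (String.ofList ((s.drop i).take guide.toList.length)).toList j ' ')]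
  rw [PySem.List.pyRange_zero_natCast, List.countP_map]
  simp only [zero_add, Nat.cast_inj]
  apply List.countP_congr
  intro j hj
  rw [List.mem_range] at hj
  simp only [Function.comp_apply, PySem.List.pyGetD_natCast, String.toList_ofList,
        List.getD_eq_getElem?_getD, List.getElem?_take, List.getElem?_drop, if_pos hj]

theorem A_char (guide genome : String) (k : Int)
    (h : guide.toList.length ≤ genome.toList.length) :
    scan_genome_for_off_targets guide genome k =
      ((List.range (genome.toList.length - guide.toList.length + 1)).filter
          (fun i => decide (dcount guide.toList genome.toList i ≤ k ∧
                            dcount guide.toList genome.toList i > 0))).map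
        (fun i => (Int.ofNat i, dcount guide.toList genome.toList i,
                    windowStr guide.toList genome.toList i)) := by
  unfold scan_genome_for_off_targets
  simp only [PySem.Str.len_eq]
  rw [show ((genome.toList.length : Int) - (guide.toList.length : Int) + 1)
        = ((genome.toList.length - guide.toList.length + 1 : Nat) : Int) by
      push_cast [h]; ring]
  rw [PySem.List.pyRange_zero_natCast, List.foldl_map]
  rw [PySem.List.foldl_congr_mem _ _
      (fun acc x =>
        if (decide (dcount guide.toList genome.toList x ≤ k ∧
                    dcount guide.toList genome.toList x > 0)) = true
        then acc ++ [(Int.ofNat x, dcount guide.toList genome.toList x,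
                      windowStr guide.toList genome.toList x)]
        else acc) _
      (by
        intro acc x hx
        rw [List.mem_range] at hx
        rw [PySem.List.slice_natCast_add,
            mismatch_window guide genome.toList x (by omega)]
        simp only [decide_eq_true_eq, windowStr]
        rfl)]
  rw [PySem.List.foldl_append_if]
  simp

theorem enum_map_zero {α β : Type} (l : List α) (F : Int → α → β) :
    (PySem.List.enumerate l 0).map (fun od => F od.1 od.2) = l.mapIdx (fun i v => F (i : Int) v) := by
  rw [PySem.List.enumerate_eq_zipIdx_map, List.map_map, List.mapIdx_eq_zipIdx_map]
  apply List.map_congr_left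
  intro p _
  simp

theorem colfold (s : List Char) (gs : List Char) (q : Nat) (acc : List Int) :
    (PySem.List.enumerate gs (q : Int)).foldl
        (fun mis pc =>
          (PySem.List.enumerate mis 0).map
            (fun od => od.2 + if PySem.List.pyGetD s (od.1 + pc.1) ' ' ≠ pc.2 then 1 else 0))
        acc
      = acc.mapIdx (fun off v =>
          v + ((List.range gs.length).countP
                (fun p => decide (gs.getD p ' ' ≠ s.getD (off + q + p) ' ')) : Int)) := by
  induction gs generalizing q acc with
  | nil =>
    simp [PySem.List.enumerate]
    apply List.ext_getElem (by simp)
    intro i h1 h2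
    simp [List.getElem_mapIdx]
  | cons c rest ih =>
    rw [PySem.List.enumerate_cons, List.foldl_cons]
    rw [show ((q : Int) + 1) = ((q + 1 : Nat) : Int) by push_cast; ring]
    rw [ih]
    rw [enum_map_zero acc
        (fun i v => v + if PySem.List.pyGetD s (i + (q : Int)) ' ' ≠ c then 1 else 0)]
    rw [List.mapIdx_mapIdx]
    apply List.ext_getElem (by simp)
    intro i h1 h2
    simp only [List.getElem_mapIdx, Function.comp]
    have hpy : PySem.List.pyGetD s ((i : Int) + (q : Int)) ' ' = s.getD (i + q) ' ' := by
      rw [show ((i : Int) + (q : Int)) = ((i + q : Nat) : Int) by push_cast; ring,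
          PySem.List.pyGetD_natCast]
    rw [hpy]
    simp only [List.length_cons]
    rw [List.range_succ_eq_map, List.countP_cons, List.countP_map]
    have hcnt : (List.countP ((fun p => decide ((c :: rest).getD p ' ' ≠ s.getD (i + q + p) ' ')) ∘ Nat.succ) (List.range rest.length))
        = List.countP (fun p => decide (rest.getD p ' ' ≠ s.getD (i + (q + 1) + p) ' ')) (List.range rest.length) := by
      apply List.countP_congr
      intro p _
      simp only [Function.comp, List.getD_cons_succ]
      rw [show i + q + (p + 1) = i + (q + 1) + p by omega]
    rw [hcnt]
    push_cast
    split_ifs with hA hB hB <;> simp_all [ne_comm] <;> omega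

theorem enum_map_range {β : Type} (W : Nat) (h : Nat → β) :
    PySem.List.enumerate ((List.range W).map h) 0
      = (List.range W).map (fun j => (Int.ofNat j, h j)) := by
  apply List.ext_getElem (by simp [PySem.List.length_enumerate])
  intro i h1 h2
  rw [PySem.List.getElem_enumerate]
  simp

theorem B_char (guide genome : String) (k : Int)
    (h0 : guide.toList.length ≠ 0) (h : guide.toList.length ≤ genome.toList.length) :
    scan_genome_for_off_targets_alt guide genome k =
      (List.range (genome.toList.length - guide.toList.length + 1)).filterMap
        (fun i => if 0 < dcount guide.toList genome.toList i ∧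
                      dcount guide.toList genome.toList i ≤ k then
            some (Int.ofNat i, dcount guide.toList genome.toList i,
                  windowStr guide.toList genome.toList i)
          else none) := by
  unfold scan_genome_for_off_targets_alt
  rw [if_neg (by omega)]
  dsimp only
  have hc :
      (PySem.List.enumerate guide.toList 0).foldl
        (fun mis pc =>
          (PySem.List.enumerate mis 0).map
            (fun od => od.2 + if PySem.List.pyGetD genome.toList (od.1 + pc.1) ' ' ≠ pc.2 then 1 else 0))
        (List.replicate (genome.toList.length - guide.toList.length + 1) (0 : Int))
      = (List.replicate (genome.toList.length - guide.toList.length + 1) (0 : Int)).mapIdx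
          (fun off v => v + ((List.range guide.toList.length).countP
              (fun p => decide (guide.toList.getD p ' ' ≠ genome.toList.getD (off + p) ' ')) : Int)) :=
    colfold genome.toList guide.toList 0
      (List.replicate (genome.toList.length - guide.toList.length + 1) (0 : Int))
  rw [hc]
  have hrep :
      (List.replicate (genome.toList.length - guide.toList.length + 1) (0 : Int)).mapIdx
          (fun off v => v + dcount guide.toList genome.toList off)
        = (List.range (genome.toList.length - guide.toList.length + 1)).map
            (fun off => dcount guide.toList genome.toList off) := by
    apply List.ext_getElem (by simp)
    intro i h1 h2
    simp [List.getElem_mapIdx]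
  rw [show (fun (off : Nat) (v : Int) => v + ((List.range guide.toList.length).countP
              (fun p => decide (guide.toList.getD p ' ' ≠ genome.toList.getD (off + p) ' ')) : Int))
        = (fun (off : Nat) (v : Int) => v + dcount guide.toList genome.toList off) from rfl]
  rw [hrep, enum_map_range, List.filterMap_map]
  apply List.filterMap_congr
  intro i hi
  rw [List.mem_range] at hi
  simp only [Function.comp, Int.ofNat_eq_natCast]
  rw [PySem.List.slice_natCast_add]
  rfl

-- ===== VERDICT (by name: the statement is the Claim_ definition above) =====
theorem scan_genome_for_off_targets_spec : Claim_equal_scan_genome_for_off_targets := by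
  intro guide genome k _
  unfold Spec_scan_genome_for_off_targets
  by_cases hm : guide.toList.length = 0 ∨ genome.toList.length < guide.toList.length
  · have hB : scan_genome_for_off_targets_alt guide genome k = [] := by
      unfold scan_genome_for_off_targets_alt
      rw [if_pos hm]
    rw [hB]
    rcases Nat.lt_or_ge genome.toList.length guide.toList.length with hn | hn
    · unfold scan_genome_for_off_targets
      dsimp only
      rw [PySem.List.pyRange_one_eq_nil (by simp only [PySem.Str.len_eq]; omega)]
      rfl
    · have h0 : guide.toList.length = 0 := by omega
      rw [A_char guide genome k hn]
      have : ∀ i, dcount guide.toList genome.toList i = 0 := by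
        intro i; unfold dcount; rw [h0]; rfl
      simp [this]
  · rw [not_or] at hm
    have h2 : guide.toList.length ≤ genome.toList.length := Nat.le_of_not_lt hm.2
    rw [A_char guide genome k h2, B_char guide genome k hm.1 h2,
        filtermap_of_filter]
    apply List.filterMap_congr
    intro i _
    simp only [decide_eq_true_eq]
    split_ifs with h1 h2 h2 <;> first | rfl | (exfalso; omega)
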